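-- pv_equiv track=rewrite | github.com/fuserwyn/Content-LoFi-YouTube-Factory | src/generate_meta.py | _youtube_tags
-- ===== SOURCE A (Python) =====
-- def _youtube_tags(tags_seed: list[str], theme: str | None) -> list[str]:
--     out: list[str] = []
--     if theme and theme.strip():
--         out.append(theme.strip()[:40])
--     for t in tags_seed:
--         s = t.strip()
--         if s and s not in out:
--             out.append(s[:40])
--     for extra in ("lofi", "chill", "ambient", "study"):
--         if extra not in [x.lower() for x in out]:
--             out.append(extra)
--     dedup: list[str] = []
--     seen: set[str] = set()
--     for item in out:
--         key = item.lower()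
--         if key not in seen:
--             seen.add(key)
--             dedup.append(item)
--     return dedup[:15]
-- ===== SOURCE B (Python) =====
-- def _youtube_tags(tags_seed: list[str], theme: str | None) -> list[str]:
--     # Gather all candidates in A's order, then one case-insensitive dedup pass.
--     candidates = []
--     if theme and theme.strip():
--         candidates.append(theme.strip()[:40])
--     candidates.extend(s[:40] for t in tags_seed if (s := t.strip()))
--     candidates.extend(("lofi", "chill", "ambient", "study"))
--     seen = set()
--     result = []
--     for item in candidates:
--         key = item.lower()
--         if key not in seen:
--             seen.add(key)
--             result.append(item)
--     return result[:15]
-- ===== Notes on version B (the rewrite author's own statement) =====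
-- stated objective: faster
-- what changed: B collects all candidate tags (trimmed theme, truncated non-empty seeds, the four defaults) into one list and performs a single case-insensitive first-occurrence dedup pass with a seen-set, replacing A's three separate dedup mechanisms (case-sensitive 'in out' list rescan per seed, lowered-list rebuild per default, final seen-set pass).
import Mathlib
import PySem

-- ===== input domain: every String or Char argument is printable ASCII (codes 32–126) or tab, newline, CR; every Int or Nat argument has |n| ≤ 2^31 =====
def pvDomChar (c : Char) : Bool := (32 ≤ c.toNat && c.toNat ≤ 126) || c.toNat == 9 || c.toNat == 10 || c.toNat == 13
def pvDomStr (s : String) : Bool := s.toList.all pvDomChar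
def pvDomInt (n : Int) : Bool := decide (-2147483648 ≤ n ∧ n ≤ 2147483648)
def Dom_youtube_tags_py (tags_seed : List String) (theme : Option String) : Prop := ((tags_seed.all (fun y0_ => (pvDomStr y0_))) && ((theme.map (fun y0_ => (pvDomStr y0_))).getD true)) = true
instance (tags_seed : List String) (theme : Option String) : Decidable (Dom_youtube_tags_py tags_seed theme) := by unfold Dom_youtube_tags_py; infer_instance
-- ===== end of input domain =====

-- B replaces A's three separate dedup mechanisms (case-sensitive 'in out' list rescan,
-- lowered-list rebuild per default tag, final seen-set pass) by collecting all candidates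
-- and doing a single case-insensitive first-occurrence dedup pass: simpler, one pass.

-- ===== PORT A =====
-- t[:40]
def pyTrunc40 (s : String) : String := PySem.Str.slice s none (some 40)

def youtube_tags_py (tags_seed : List String) (theme : Option String) : List String :=
  -- out = []; if theme and theme.strip(): out.append(theme.strip()[:40])
  let out0 : List String :=
    match theme with
    | none => []
    | some th =>
        if th.toList ≠ [] ∧ (PySem.Str.strip th).toList ≠ [] then
          [pyTrunc40 (PySem.Str.strip th)]
        else []
  -- for t in tags_seed: s = t.strip(); if s and s not in out: out.append(s[:40])
  let out1 := tags_seed.foldl (fun out t =>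
      if (PySem.Str.strip t).toList ≠ [] ∧ PySem.Str.strip t ∉ out then
        out ++ [pyTrunc40 (PySem.Str.strip t)]
      else out) out0
  -- for extra in ("lofi","chill","ambient","study"):
  --   if extra not in [x.lower() for x in out]: out.append(extra)
  let out2 := (["lofi", "chill", "ambient", "study"] : List String).foldl (fun out extra =>
      if extra ∉ out.map PySem.Str.lower then out ++ [extra] else out) out1
  -- dedup = []; seen = set(); for item in out:
  --   key = item.lower(); if key not in seen: seen.add(key); dedup.append(item)
  let ded := out2.foldl (fun (acc : List String × PySem.Set String) item =>
      if PySem.Str.lower item ∉ acc.2 then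
        (acc.1 ++ [item], acc.2.add (PySem.Str.lower item))
      else acc)
      (([] : List String), PySem.Set.ofList [])
  -- return dedup[:15]
  PySem.List.slice ded.1 none (some 15)

-- ===== PORT B =====
-- Source B's single dedup loop: keep item if item.lower() unseen
def dedupCI (seen : PySem.Set String) : List String → List String
  | [] => []
  | item :: rest =>
      if PySem.Str.lower item ∈ seen then dedupCI seen rest
      else item :: dedupCI (seen.add (PySem.Str.lower item)) rest

def youtube_tags_py_alt (tags_seed : List String) (theme : Option String) : List String :=
  -- candidates: trimmed theme, truncated non-empty stripped seeds, the four defaults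
  let themePart : List String :=
    match theme with
    | none => []
    | some th =>
        if th.toList ≠ [] ∧ (PySem.Str.strip th).toList ≠ [] then
          [pyTrunc40 (PySem.Str.strip th)]
        else []
  let candidates := themePart
    ++ tags_seed.filterMap (fun t =>
        if (PySem.Str.strip t).toList ≠ [] then some (pyTrunc40 (PySem.Str.strip t)) else none)
    ++ (["lofi", "chill", "ambient", "study"] : List String)
  -- return result[:15]
  PySem.List.slice (dedupCI (PySem.Set.ofList []) candidates) none (some 15)

-- ===== PRECONDITION & SPEC =====
def Spec_youtube_tags_py (tags_seed : List String) (theme : Option String) (out : List String) : Prop := out = youtube_tags_py_alt tags_seed theme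
instance (tags_seed : List String) (theme : Option String) (out : List String) : Decidable (Spec_youtube_tags_py tags_seed theme out) := by unfold Spec_youtube_tags_py; infer_instance

-- ===== CLAIM (what is proved, stated in full; the proofs are below) =====
def Claim_equal_youtube_tags_py : Prop := ∀ (tags_seed : List String) (theme : Option String), Dom_youtube_tags_py tags_seed theme → Spec_youtube_tags_py tags_seed theme (youtube_tags_py tags_seed theme)

-- ===== LEMMAS AND PROOFS =====

-- A's final dedup fold computes B's dedupCI
lemma foldl_dedup_eq (l : List String) : ∀ (d : List String) (seen : PySem.Set String),
    (l.foldl (fun (acc : List String × PySem.Set String) item =>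
      if PySem.Str.lower item ∉ acc.2 then
        (acc.1 ++ [item], acc.2.add (PySem.Str.lower item))
      else acc) (d, seen)).1
    = d ++ dedupCI seen l := by
  induction l with
  | nil => intro d seen; simp [dedupCI]
  | cons x l ih =>
      intro d seen
      simp only [List.foldl_cons, dedupCI]
      by_cases h : PySem.Str.lower x ∈ seen
      · rw [if_neg (not_not_intro h), if_pos h, ih]
      · rw [if_pos h, if_neg h, ih]
        simp

-- truncation facts
lemma length_pyTrunc40 (s : String) : (pyTrunc40 s).toList.length ≤ 40 := by
  simp [pyTrunc40, PySem.Str.toList_slice, PySem.Chars.slice_eq_listSlice,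
        PySem.List.slice_to (b := (40 : Int)) s.toList (by norm_num)]

lemma pyTrunc40_eq_of_le (s : String) (h : s.toList.length ≤ 40) : pyTrunc40 s = s := by
  refine String.toList_inj.mp ?_
  simp [pyTrunc40, PySem.Str.toList_slice, PySem.Chars.slice_eq_listSlice,
        PySem.List.slice_to (b := (40 : Int)) s.toList (by norm_num),
        List.take_of_length_le h]

-- dropping an element whose lowercase key occurs earlier does not change dedupCI
lemma dedupCI_skip (xs : List String) : ∀ (seen : PySem.Set String) (x : String) (l : List String),
    (PySem.Str.lower x ∈ seen ∨ PySem.Str.lower x ∈ xs.map PySem.Str.lower) →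
    dedupCI seen (xs ++ x :: l) = dedupCI seen (xs ++ l) := by
  induction xs with
  | nil =>
      intro seen x l h
      have hx : PySem.Str.lower x ∈ seen := by simpa using h
      simp [dedupCI, hx]
  | cons y xs ih =>
      intro seen x l h
      simp only [List.cons_append, dedupCI]
      by_cases hy : PySem.Str.lower y ∈ seen
      · rw [if_pos hy, if_pos hy]
        refine ih seen x l ?_
        rcases h with h | h
        · exact Or.inl h
        · simp only [List.map_cons, List.mem_cons] at h
          rcases h with h | h
          · exact Or.inl (h ▸ hy)
          · exact Or.inr h
      · rw [if_neg hy, if_neg hy]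
        congr 1
        refine ih _ x l ?_
        rcases h with h | h
        · exact Or.inl ((PySem.Set.mem_add seen _ _).mpr (Or.inl h))
        · simp only [List.map_cons, List.mem_cons] at h
          rcases h with h | h
          · exact Or.inl ((PySem.Set.mem_add seen _ _).mpr (Or.inr h))
          · exact Or.inr h

-- A's defaults loop, seen through dedupCI, just appends the defaults
lemma extras_stage (es : List String) : ∀ (out : List String) (seen : PySem.Set String),
    (∀ e ∈ es, PySem.Str.lower e = e) →
    dedupCI seen (es.foldl (fun out extra =>
        if extra ∉ out.map PySem.Str.lower then out ++ [extra] else out) out)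
    = dedupCI seen (out ++ es) := by
  induction es with
  | nil => intro out seen _; simp
  | cons e es ih =>
      intro out seen hlow
      simp only [List.foldl_cons]
      by_cases hmem : e ∈ out.map PySem.Str.lower
      · rw [if_neg (not_not_intro hmem)]
        rw [ih out seen (fun x hx => hlow x (List.mem_cons_of_mem _ hx))]
        exact (dedupCI_skip out seen e es
          (Or.inr (by rw [hlow e List.mem_cons_self]; exact hmem))).symm
      · rw [if_pos hmem]
        rw [ih (out ++ [e]) seen (fun x hx => hlow x (List.mem_cons_of_mem _ hx))]
        simp

-- A's seed loop, seen through dedupCI, just appends the truncated non-empty seeds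
lemma seeds_stage (ts : List String) : ∀ (out tail : List String) (seen : PySem.Set String),
    (∀ x ∈ out, x.toList.length ≤ 40) →
    dedupCI seen ((ts.foldl (fun out t =>
        if (PySem.Str.strip t).toList ≠ [] ∧ PySem.Str.strip t ∉ out then
          out ++ [pyTrunc40 (PySem.Str.strip t)]
        else out) out) ++ tail)
    = dedupCI seen (out ++ (ts.filterMap (fun t =>
        if (PySem.Str.strip t).toList ≠ [] then some (pyTrunc40 (PySem.Str.strip t)) else none)) ++ tail) := by
  induction ts with
  | nil => intro out tail seen _; simp
  | cons t ts ih =>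
      intro out tail seen hlen
      simp only [List.foldl_cons, List.filterMap_cons]
      by_cases hs : (PySem.Str.strip t).toList = []
      · rw [if_neg (by simp [hs]), if_neg (not_not_intro hs)]
        exact ih out tail seen hlen
      · by_cases hin : PySem.Str.strip t ∈ out
        · -- A skips (case-sensitive duplicate); B keeps it, dedupCI drops it
          rw [if_neg (by simp [hin]), if_pos hs]
          rw [ih out tail seen hlen]
          have htr : pyTrunc40 (PySem.Str.strip t) = PySem.Str.strip t :=
            pyTrunc40_eq_of_le _ (hlen _ hin)
          have hskip := dedupCI_skip out seen (pyTrunc40 (PySem.Str.strip t))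
            ((ts.filterMap (fun t =>
              if (PySem.Str.strip t).toList ≠ [] then some (pyTrunc40 (PySem.Str.strip t)) else none)) ++ tail)
            (Or.inr (by rw [htr]; exact List.mem_map_of_mem hin))
          simp only [List.append_assoc, List.cons_append] at hskip ⊢
          exact hskip.symm
        · -- both append the truncated seed
          rw [if_pos ⟨hs, hin⟩, if_pos hs]
          have hlen' : ∀ x ∈ out ++ [pyTrunc40 (PySem.Str.strip t)], x.toList.length ≤ 40 := by
            intro x hx
            rcases List.mem_append.mp hx with hx | hx
            · exact hlen x hx
            · simp only [List.mem_singleton] at hx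
              exact hx ▸ length_pyTrunc40 _
          have := ih (out ++ [pyTrunc40 (PySem.Str.strip t)]) tail seen hlen'
          simp only [List.append_assoc, List.singleton_append] at this
          simpa using this

-- ===== VERDICT (by name: the statement is the Claim_ definition above) =====
theorem youtube_tags_py_spec : Claim_equal_youtube_tags_py := by
  intro tags_seed theme _
  show youtube_tags_py tags_seed theme = youtube_tags_py_alt tags_seed theme
  rcases theme with _ | th <;>
  · unfold youtube_tags_py youtube_tags_py_alt
    simp only [foldl_dedup_eq, List.nil_append]
    rw [extras_stage _ _ _ (by decide), seeds_stage _ _ _ _ ?_]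
    all_goals first
      | rfl
      | simp only [List.append_assoc, List.nil_append]
      | (intro x hx; simp at hx; exact hx.2 ▸ length_pyTrunc40 _)
      | (intro x hx; simp at hx)
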